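-- pv_equiv track=rewrite | github.com/bic4907/multigame-pcgrl | train_clip_decoder.py | _game_color
-- ===== SOURCE A (Python) =====
-- from typing import Dict, List, Set, Tuple
--
-- _SEEN_COLORS = ["#e41a1c", "#ff7f00", "#d95f02", "#b2182b", "#cb181d"]
--
-- _UNSEEN_COLORS = ["#377eb8", "#4daf4a", "#6baed6", "#2171b5", "#08519c"]
--
-- def _game_color(game: str, unseen_game_names: Set[str], game_list: List[str]) -> str:
--     """게임 이름 → 색상.  seen=red계열, unseen=blue계열."""
--     seen_games = [g for g in game_list if g not in unseen_game_names]
--     unseen_games = [g for g in game_list if g in unseen_game_names]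
--     if game in unseen_game_names:
--         idx = unseen_games.index(game) % len(_UNSEEN_COLORS)
--         return _UNSEEN_COLORS[idx]
--     else:
--         idx = seen_games.index(game) % len(_SEEN_COLORS)
--         return _SEEN_COLORS[idx]
-- ===== SOURCE B (Python) =====
-- _SEEN_COLORS = ["#e41a1c", "#ff7f00", "#d95f02", "#b2182b", "#cb181d"]
--
-- _UNSEEN_COLORS = ["#377eb8", "#4daf4a", "#6baed6", "#2171b5", "#08519c"]
--
--
-- def _game_color(game, unseen_game_names, game_list):
--     # Build the whole round-robin color table for game_list once, then look up.
--     palette = {}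
--     counters = [0, 0]  # [seen occurrences, unseen occurrences] processed so far
--     for g in game_list:
--         k = 1 if g in unseen_game_names else 0
--         if g not in palette:
--             colors = _UNSEEN_COLORS if k else _SEEN_COLORS
--             palette[g] = colors[counters[k] % len(colors)]
--         counters[k] += 1
--     return palette[game]
-- ===== Notes on version B (the rewrite author's own statement) =====
-- stated objective: alternative
-- what changed: Instead of filtering game_list into two category lists and calling .index on the right one, B builds a dict assigning every game its round-robin color in one pass (two category counters, first occurrence wins) and answers by a single dict lookup.
import Mathlib
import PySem

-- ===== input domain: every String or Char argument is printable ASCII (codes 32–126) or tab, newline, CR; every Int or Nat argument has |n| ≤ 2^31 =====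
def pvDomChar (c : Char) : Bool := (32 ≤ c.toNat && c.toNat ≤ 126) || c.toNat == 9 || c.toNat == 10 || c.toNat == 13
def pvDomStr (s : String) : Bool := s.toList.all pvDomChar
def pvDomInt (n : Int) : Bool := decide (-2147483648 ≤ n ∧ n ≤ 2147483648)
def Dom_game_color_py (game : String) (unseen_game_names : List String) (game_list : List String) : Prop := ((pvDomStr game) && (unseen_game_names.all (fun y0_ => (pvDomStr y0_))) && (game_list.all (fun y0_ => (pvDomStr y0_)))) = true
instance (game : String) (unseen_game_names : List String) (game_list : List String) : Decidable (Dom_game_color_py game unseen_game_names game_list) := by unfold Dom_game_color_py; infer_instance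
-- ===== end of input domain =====

-- B replaces A's two filtered lists + .index by building the whole round-robin color table
-- (a dict over game_list, first occurrence wins, two category counters) and a single lookup;
-- same return value on Pre_ (game present in game_list).

-- ===== PORT A =====
def pvSeenColors : List String := ["#e41a1c", "#ff7f00", "#d95f02", "#b2182b", "#cb181d"]
def pvUnseenColors : List String := ["#377eb8", "#4daf4a", "#6baed6", "#2171b5", "#08519c"]

def game_color_py (game : String) (unseen_game_names : List String) (game_list : List String) : String :=
  let seen_games := game_list.filter (fun g => !(unseen_game_names.contains g))
  let unseen_games := game_list.filter (fun g => unseen_game_names.contains g)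
  if unseen_game_names.contains game then
    match PySem.List.index? unseen_games game with
    | some i => (pvUnseenColors[i % pvUnseenColors.length]?).getD ""
    | none => ""   -- ValueError in Python; excluded by Pre_
  else
    match PySem.List.index? seen_games game with
    | some i => (pvSeenColors[i % pvSeenColors.length]?).getD ""
    | none => ""   -- ValueError in Python; excluded by Pre_

-- ===== PORT B =====
-- the for-loop of Source B: state = (palette dict, seen counter, unseen counter)
def pvBuild (unseen_game_names : List String) :
    List String → PySem.Dict String String → Nat → Nat → PySem.Dict String String
  | [], d, _, _ => d
  | g :: rest, d, cs, cu =>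
    let k := unseen_game_names.contains g
    let d' :=
      if d.contains g then d
      else
        let colors := if k then pvUnseenColors else pvSeenColors
        let cnt := if k then cu else cs
        d.insert g ((colors[cnt % colors.length]?).getD "")
    pvBuild unseen_game_names rest d' (if k then cs else cs + 1) (if k then cu + 1 else cu)

def game_color_py_alt (game : String) (unseen_game_names : List String) (game_list : List String) : String :=
  let palette := pvBuild unseen_game_names game_list PySem.Dict.empty 0 0
  (palette.get? game).getD ""   -- KeyError in Python when absent; excluded by Pre_

-- ===== PRECONDITION & SPEC =====
-- Pre_ excludes exactly the inputs where game is absent from game_list: there A's .index raises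
-- ValueError (and B's dict lookup raises KeyError).
def Pre_game_color_py (game : String) (unseen_game_names : List String) (game_list : List String) : Prop :=
  game ∈ game_list
instance (game : String) (unseen_game_names : List String) (game_list : List String) : Decidable (Pre_game_color_py game unseen_game_names game_list) := by unfold Pre_game_color_py; infer_instance

def pvWitness_game_color_py : String × List String × List String := ("binary", ["zelda"], ["binary", "zelda"])

def Spec_game_color_py (game : String) (unseen_game_names : List String) (game_list : List String) (out : String) : Prop := out = game_color_py_alt game unseen_game_names game_list
instance (game : String) (unseen_game_names : List String) (game_list : List String) (out : String) : Decidable (Spec_game_color_py game unseen_game_names game_list out) := by unfold Spec_game_color_py; infer_instance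

-- ===== CLAIM (what is proved, stated in full; the proofs are below) =====
def Claim_equal_game_color_py : Prop := ∀ (game : String) (unseen_game_names : List String) (game_list : List String), Dom_game_color_py game unseen_game_names game_list → Pre_game_color_py game unseen_game_names game_list → Spec_game_color_py game unseen_game_names game_list (game_color_py game unseen_game_names game_list)

-- ===== LEMMAS AND PROOFS =====

-- once game is in the dict, the rest of the build never changes its value
lemma pvBuild_get_some (unseen : List String) (game : String) (v : String) :
    ∀ (l : List String) (d : PySem.Dict String String) (cs cu : Nat),
      d.get? game = some v →
      (pvBuild unseen l d cs cu).get? game = some v := by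
  intro l
  induction l with
  | nil => intro d cs cu h; simpa [pvBuild] using h
  | cons g rest ih =>
    intro d cs cu h
    rw [pvBuild]
    apply ih
    by_cases hc : d.contains g = true
    · simpa [hc] using h
    · have hne : game ≠ g := by
        intro e
        rw [PySem.Dict.contains_eq_isSome_get?, ← e, h] at hc
        simp at hc
      simp only [hc]
      rw [if_neg (by simp [hc])]
      rw [PySem.Dict.get?_insert_of_ne _ _ hne]
      exact h

-- while game is not yet in the dict, the build's final value for game is the color at
-- (current category counter + index of game in the same-category remainder)
lemma pvBuild_get_none (unseen : List String) (game : String)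
    (inUn : Bool) (hg : unseen.contains game = inUn) :
    ∀ (l : List String) (d : PySem.Dict String String) (cs cu : Nat),
      d.get? game = none →
      (pvBuild unseen l d cs cu).get? game =
        (PySem.List.index? (l.filter (fun g => unseen.contains g == inUn)) game).map
          (fun i =>
            (((if inUn then pvUnseenColors else pvSeenColors)[((if inUn then cu else cs) + i) %
              (if inUn then pvUnseenColors else pvSeenColors).length]?).getD "")) := by
  intro l
  induction l with
  | nil =>
    intro d cs cu h
    simp [pvBuild, PySem.List.index?_eq_idxOf?, List.idxOf?, h]
  | cons g rest ih =>
    intro d cs cu h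
    rw [pvBuild]
    by_cases hgame : g = game
    · -- first occurrence of game: it gets inserted here with the current counter
      subst hgame
      have hc : d.contains g = false := by
        rw [PySem.Dict.contains_eq_isSome_get?, h]; rfl
      have hfil : (g :: rest).filter (fun x => unseen.contains x == inUn)
          = g :: rest.filter (fun x => unseen.contains x == inUn) := by
        simp only [List.filter_cons]; rw [hg]; simp
      rw [hfil, PySem.List.index?_cons_self]
      simp only [hc, hg]
      rw [if_neg (by simp)]
      rw [pvBuild_get_some unseen g _ rest _ _ _ (PySem.Dict.get?_insert_self d g _)]
      cases inUn <;> simp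
    · by_cases hk : unseen.contains g = inUn
      · -- same category, different game: counter for this category advances by one
        have hfil : (g :: rest).filter (fun x => unseen.contains x == inUn)
            = g :: rest.filter (fun x => unseen.contains x == inUn) := by
          simp only [List.filter_cons]; rw [hk]; simp
        rw [hfil, PySem.List.index?_cons_of_ne _ hgame]
        have hd' : ∀ d' : PySem.Dict String String,
            d'.get? game = none →
            (pvBuild unseen rest d' (if unseen.contains g then cs else cs + 1)
              (if unseen.contains g then cu + 1 else cu)).get? game =
            (PySem.List.index? (rest.filter (fun x => unseen.contains x == inUn)) game).map
              (fun i =>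
                (((if inUn then pvUnseenColors else pvSeenColors)[((if inUn then cu + 1 else cs + 1) + i) %
                  (if inUn then pvUnseenColors else pvSeenColors).length]?).getD "")) := by
          intro d' h'
          rw [hk, ih d' _ _ h']
          cases inUn <;> simp
        have hnone : (if d.contains g then d
            else d.insert g (((if unseen.contains g then pvUnseenColors else pvSeenColors)[(if unseen.contains g then cu else cs) %
              (if unseen.contains g then pvUnseenColors else pvSeenColors).length]?).getD "")).get? game = none := by
          by_cases hc : d.contains g = true
          · simpa [hc] using h
          · simp only [hc]
            rw [if_neg (by simp [hc]), PySem.Dict.get?_insert_of_ne _ _ (Ne.symm hgame)]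
            exact h
        rw [hd' _ hnone]
        cases hidx : PySem.List.index? (rest.filter (fun x => unseen.contains x == inUn)) game with
        | none => simp
        | some i =>
          simp only [Option.map_some]
          have : (if inUn then cu + 1 else cs + 1) + i = (if inUn then cu else cs) + (i + 1) := by
            cases inUn <;> simp <;> omega
          rw [this]
      · -- other category: skipped by the filter, game's counter unchanged
        have hkne : (unseen.contains g == inUn) = false := by
          cases hG : unseen.contains g <;> cases hI : inUn <;> simp_all
        have hfil : (g :: rest).filter (fun x => unseen.contains x == inUn)
            = rest.filter (fun x => unseen.contains x == inUn) := by
          rw [List.filter_cons, hkne]; simp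
        have hnone : (if d.contains g then d
            else d.insert g (((if unseen.contains g then pvUnseenColors else pvSeenColors)[(if unseen.contains g then cu else cs) %
              (if unseen.contains g then pvUnseenColors else pvSeenColors).length]?).getD "")).get? game = none := by
          by_cases hc : d.contains g = true
          · simpa [hc] using h
          · simp only [hc]
            rw [if_neg (by simp [hc]), PySem.Dict.get?_insert_of_ne _ _ (Ne.symm hgame)]
            exact h
        rw [hfil]
        rw [ih _ _ _ hnone]
        -- the counter of game's category is unchanged
        cases hG : unseen.contains g
        · -- g is seen, so game is unseen (inUn = true)
          have hI : inUn = true := by cases hI : inUn <;> simp_all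
          simp [hG, hI]
        · have hI : inUn = false := by cases hI : inUn <;> simp_all
          simp [hG, hI]

-- ===== VERDICT (by name: the statement is the Claim_ definition above) =====
theorem game_color_py_spec : Claim_equal_game_color_py := by
  intro game unseen game_list _ hpre
  unfold Spec_game_color_py
  simp only [game_color_py, game_color_py_alt]
  rw [pvBuild_get_none unseen game (unseen.contains game) rfl game_list PySem.Dict.empty 0 0
      (PySem.Dict.get?_empty _)]
  by_cases hc : unseen.contains game = true
  · rw [if_pos hc, hc]
    have hfil : game_list.filter (fun g => unseen.contains g == true)
        = game_list.filter (fun g => unseen.contains g) := by simp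
    rw [hfil]
    have hmem : game ∈ game_list.filter (fun g => unseen.contains g) :=
      List.mem_filter.mpr ⟨hpre, hc⟩
    have hsome : (PySem.List.index? (game_list.filter (fun g => unseen.contains g)) game).isSome := by
      rw [PySem.List.index?_isSome_iff]; exact hmem
    obtain ⟨i, h⟩ := Option.isSome_iff_exists.mp hsome
    rw [h]
    simp
  · have hc' : unseen.contains game = false := by simpa using hc
    rw [if_neg (by simpa using hc'), hc']
    have hfil : game_list.filter (fun g => unseen.contains g == false)
        = game_list.filter (fun g => !(unseen.contains g)) := by simp
    rw [hfil]
    have hmem : game ∈ game_list.filter (fun g => !(unseen.contains g)) :=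
      List.mem_filter.mpr ⟨hpre, by simpa using hc'⟩
    have hsome : (PySem.List.index? (game_list.filter (fun g => !(unseen.contains g))) game).isSome := by
      rw [PySem.List.index?_isSome_iff]; exact hmem
    obtain ⟨i, h⟩ := Option.isSome_iff_exists.mp hsome
    rw [h]
    simp
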